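-- pv_equiv track=rewrite | github.com/pypi-data/pypi-mirror-404 | packages/splunk-as/splunk_as-1.1.6.tar.gz/splunk_as-1.1.6/src/splunk_as/spl_helper.py | parse_spl_commands
-- ===== SOURCE A (Python) =====
-- from typing import Any, Dict, List, Optional, Set, Tuple
--
-- def parse_spl_commands(spl: str) -> List[Tuple[str, str]]:
--     """
--     Parse SPL into command pipeline.
--
--     Args:
--         spl: SPL query
--
--     Returns:
--         List of (command_name, arguments) tuples
--     """
--     commands: List[Tuple[str, str]] = []
--     spl = spl.strip()
--
--     # Handle implicit search command
--     if not spl.startswith("|"):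
--         spl = f"search {spl}"
--
--     # Split by pipe, handling nested brackets and strings
--     current_cmd: List[str] = []
--     in_string = False
--     string_char: Optional[str] = None
--     bracket_depth = 0
--
--     for char in spl:
--         if char in "\"'":
--             if not in_string:
--                 in_string = True
--                 string_char = char
--             elif char == string_char:
--                 in_string = False
--             current_cmd.append(char)
--         elif not in_string:
--             if char in "[(":
--                 bracket_depth += 1
--                 current_cmd.append(char)
--             elif char in "])":
--                 bracket_depth -= 1
--                 current_cmd.append(char)
--             elif char == "|" and bracket_depth == 0:
--                 cmd_str = "".join(current_cmd).strip()
--                 if cmd_str: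
--                     cmd_parts = cmd_str.split(None, 1)
--                     cmd_name = cmd_parts[0]
--                     cmd_args = cmd_parts[1] if len(cmd_parts) > 1 else ""
--                     commands.append((cmd_name, cmd_args))
--                 current_cmd = []
--             else:
--                 current_cmd.append(char)
--         else:
--             current_cmd.append(char)
--
--     # Handle last command
--     cmd_str = "".join(current_cmd).strip()
--     if cmd_str:
--         cmd_parts = cmd_str.split(None, 1)
--         cmd_name = cmd_parts[0]
--         cmd_args = cmd_parts[1] if len(cmd_parts) > 1 else ""
--         commands.append((cmd_name, cmd_args))
--
--     return commands
-- ===== SOURCE B (Python) =====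
-- def parse_spl_commands(spl):
--     """Split-then-repair: naive split on '|', then merge back pieces whose
--     separating pipe was inside a string or brackets, then parse each segment."""
--     spl = spl.strip()
--     if not spl.startswith("|"):
--         spl = "search " + spl
--
--     def advance(state, chunk):
--         in_string, string_char, depth = state
--         for ch in chunk:
--             if in_string:
--                 if ch == string_char:
--                     in_string = False
--             elif ch in "\"'":
--                 in_string = True
--                 string_char = ch
--             elif ch in "[(":
--                 depth += 1
--             elif ch in "])":
--                 depth -= 1
--         return (in_string, string_char, depth)
--
--     pieces = spl.split("|")
--     segments = [pieces[0]]
--     state = advance((False, None, 0), pieces[0])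
--     for piece in pieces[1:]:
--         in_string, _, depth = state
--         if not in_string and depth == 0:
--             segments.append(piece)
--         else:
--             segments[-1] += "|" + piece
--         state = advance(state, piece)
--
--     commands = []
--     for seg in segments:
--         seg = seg.strip()
--         if seg:
--             parts = seg.split(None, 1)
--             commands.append((parts[0], parts[1] if len(parts) > 1 else ""))
--     return commands
-- ===== Notes on version B (the rewrite author's own statement) =====
-- stated objective: alternative
-- what changed: A's single character-level state machine that cuts the pipeline while scanning is replaced by split-then-repair: split naively at every pipe character, then merge back adjacent pieces whose separating pipe the per-piece-advanced quote/bracket state shows was quoted or bracketed, then parse each repaired segment.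
import Mathlib
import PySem

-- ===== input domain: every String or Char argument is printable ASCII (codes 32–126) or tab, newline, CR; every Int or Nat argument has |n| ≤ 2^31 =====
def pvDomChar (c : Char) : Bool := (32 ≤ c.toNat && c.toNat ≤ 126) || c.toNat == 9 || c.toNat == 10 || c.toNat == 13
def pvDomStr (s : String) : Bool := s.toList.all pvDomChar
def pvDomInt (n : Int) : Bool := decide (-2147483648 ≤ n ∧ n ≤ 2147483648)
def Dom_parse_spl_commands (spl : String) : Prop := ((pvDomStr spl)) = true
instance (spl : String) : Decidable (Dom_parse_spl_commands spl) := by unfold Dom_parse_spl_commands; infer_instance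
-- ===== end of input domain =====

-- B replaces A's character-by-character cutting state machine with split-then-repair: split
-- naively on every '|', then merge back the pieces whose separating pipe was inside a string
-- or brackets (state advanced per piece), then parse each segment; bulk splitting makes B
-- measurably faster in CPython (constant factor).

-- ===== PORT A =====
-- A's duplicated "flush current command" block (appears twice in the Python source)
def pvAEmit (commands : List (String × String)) (cur : List Char) : List (String × String) :=
  let cmdStr := PySem.Chars.strip cur
  if cmdStr = [] then commands
  else
    match PySem.Chars.split₀Max cmdStr 1 with
    | p0 :: ps => commands ++ [(String.ofList p0, String.ofList (ps.headD []))]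
    | [] => commands ++ [("", "")]    -- unreachable: cmdStr ≠ [] (Python would raise IndexError)

-- one loop iteration of A: state = (commands, current_cmd, in_string, string_char, bracket_depth)
def pvAStep (st : List (String × String) × List Char × Bool × Option Char × Int) (c : Char) :
    List (String × String) × List Char × Bool × Option Char × Int :=
  let (commands, cur, inStr, sc, depth) := st
  if c == '"' || c == '\'' then
    if !inStr then (commands, cur ++ [c], true, some c, depth)
    else if some c == sc then (commands, cur ++ [c], false, sc, depth)
    else (commands, cur ++ [c], inStr, sc, depth)
  else if !inStr then
    if c == '[' || c == '(' then (commands, cur ++ [c], inStr, sc, depth + 1)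
    else if c == ']' || c == ')' then (commands, cur ++ [c], inStr, sc, depth - 1)
    else if c == '|' && depth == 0 then (pvAEmit commands cur, [], inStr, sc, depth)
    else (commands, cur ++ [c], inStr, sc, depth)
  else (commands, cur ++ [c], inStr, sc, depth)

def parse_spl_commands (spl : String) : List (String × String) :=
  let s0 := PySem.Chars.strip spl.toList
  let s := if PySem.Chars.startswith s0 ['|'] then s0 else "search ".toList ++ s0
  let fin := s.foldl pvAStep ([], [], false, none, 0)
  pvAEmit fin.1 fin.2.1

-- ===== PORT B =====
-- B's helper `advance`, one character: state = (in_string, string_char, depth)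
def pvAdv (st : Bool × Option Char × Int) (c : Char) : Bool × Option Char × Int :=
  let (inStr, sc, d) := st
  if inStr then (if some c == sc then false else inStr, sc, d)
  else if c == '"' || c == '\'' then (true, some c, d)
  else if c == '[' || c == '(' then (inStr, sc, d + 1)
  else if c == ']' || c == ')' then (inStr, sc, d - 1)
  else (inStr, sc, d)

-- B's helper `advance` over a whole chunk (its for-loop)
def pvAdvL (st : Bool × Option Char × Int) (chunk : List Char) : Bool × Option Char × Int :=
  chunk.foldl pvAdv st

-- hand port of Python's s.split("|") for the single-character separator "|": exact
-- (splitting at every '|', empty pieces kept, [""] on the empty string)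
def pvSplitPipe : List Char → List (List Char)
  | [] => [[]]
  | c :: s =>
    if c = '|' then [] :: pvSplitPipe s
    else match pvSplitPipe s with
         | h :: t => (c :: h) :: t
         | [] => [[c]]    -- unreachable: pvSplitPipe never returns []

-- one iteration of B's repair loop: state = (segments, scanner state before this piece)
def pvMergeStep (acc : List (List Char) × Bool × Option Char × Int) (p : List Char) :
    List (List Char) × Bool × Option Char × Int :=
  let (segs, st) := acc
  if !st.1 && st.2.2 == 0 then (segs ++ [p], pvAdvL st p)
  else (segs.dropLast ++ [segs.getLastD [] ++ '|' :: p], pvAdvL st p)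

-- pass 2 of B: parse one stripped segment (none = empty after strip, skipped)
def pvSegParse? (seg : List Char) : Option (String × String) :=
  let s := PySem.Chars.strip seg
  if s = [] then none
  else
    match PySem.Chars.split₀Max s 1 with
    | p0 :: ps => some (String.ofList p0, String.ofList (ps.headD []))
    | [] => some ("", "")    -- unreachable: s ≠ []

def parse_spl_commands_alt (spl : String) : List (String × String) :=
  let s0 := PySem.Chars.strip spl.toList
  let s := if PySem.Chars.startswith s0 ['|'] then s0 else "search ".toList ++ s0
  let pieces := pvSplitPipe s
  let first := pieces.headD []
  let fin := pieces.tail.foldl pvMergeStep ([first], pvAdvL (false, none, 0) first)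
  fin.1.filterMap pvSegParse?

-- ===== PRECONDITION & SPEC =====
def Spec_parse_spl_commands (spl : String) (out : List (String × String)) : Prop := out = parse_spl_commands_alt spl
instance (spl : String) (out : List (String × String)) : Decidable (Spec_parse_spl_commands spl out) := by unfold Spec_parse_spl_commands; infer_instance

-- ===== CLAIM (what is proved, stated in full; the proofs are below) =====
def Claim_equal_parse_spl_commands : Prop := ∀ (spl : String), Dom_parse_spl_commands spl → Spec_parse_spl_commands spl (parse_spl_commands spl)

-- ===== LEMMAS AND PROOFS =====

-- proof gadget: A's fused loop re-expressed as a segment-cutting scan (same state machine,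
-- collecting raw segments); the glue between the two ports
def pvBScan (st : List (List Char) × List Char × Bool × Option Char × Int) (c : Char) :
    List (List Char) × List Char × Bool × Option Char × Int :=
  let (segs, cur, inStr, sc, depth) := st
  if inStr then (segs, cur ++ [c], !(some c == sc), sc, depth)
  else if c == '"' || c == '\'' then (segs, cur ++ [c], true, some c, depth)
  else if c == '[' || c == '(' then (segs, cur ++ [c], false, sc, depth + 1)
  else if c == ']' || c == ')' then (segs, cur ++ [c], false, sc, depth - 1)
  else if c == '|' && depth == 0 then (segs ++ [cur], [], false, sc, depth)
  else (segs, cur ++ [c], false, sc, depth)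

-- map a scan state to the corresponding A-state: parse the segments collected so far
def pvToA (st : List (List Char) × List Char × Bool × Option Char × Int) :
    List (String × String) × List Char × Bool × Option Char × Int :=
  (st.1.filterMap pvSegParse?, st.2.1, st.2.2.1, st.2.2.2.1, st.2.2.2.2)

-- invariant: while inside a string, string_char is one of the two quote chars
def pvInv (st : List (List Char) × List Char × Bool × Option Char × Int) : Prop :=
  st.2.2.1 = true → st.2.2.2.1 = some '"' ∨ st.2.2.2.1 = some '\''

-- same invariant for B's bare triple state
def pvInv3 (st : Bool × Option Char × Int) : Prop :=
  st.1 = true → st.2.1 = some '"' ∨ st.2.1 = some '\''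

lemma pvAEmit_eq (commands : List (String × String)) (cur : List Char) :
    pvAEmit commands cur = commands ++ (pvSegParse? cur).toList := by
  simp only [pvAEmit, pvSegParse?]
  split_ifs with h
  · simp
  · cases PySem.Chars.split₀Max (PySem.Chars.strip cur) 1 <;> simp

lemma pvStep_eq (st : List (List Char) × List Char × Bool × Option Char × Int) (c : Char)
    (h : pvInv st) : pvAStep (pvToA st) c = pvToA (pvBScan st c) ∧ pvInv (pvBScan st c) := by
  obtain ⟨segs, cur, inStr, sc, depth⟩ := st
  simp only [pvAStep, pvBScan, pvToA, pvInv] at *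
  by_cases hq : c = '"' ∨ c = '\''
  · by_cases hi : inStr = true
    · subst hi
      rcases h rfl with hsc | hsc <;> subst hsc <;>
        rcases hq with h1 | h1 <;> subst h1 <;> simp
    · replace hi : inStr = false := by simpa using hi
      subst hi
      rcases hq with h1 | h1 <;> subst h1 <;> simp
  · have hq1 : (c == '"' || c == '\'') = false := by
      simp only [Bool.or_eq_false_iff, beq_eq_false_iff_ne]; tauto
    by_cases hi : inStr = true
    · subst hi
      rcases h rfl with hsc | hsc <;> subst hsc <;>
        simp_all [show ¬ (c = '"') from fun hh => hq (Or.inl hh),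
                  show ¬ (c = '\'') from fun hh => hq (Or.inr hh)]
    · replace hi : inStr = false := by simpa using hi
      subst hi
      simp only [hq1, Bool.false_eq_true, if_false, Bool.not_false, if_true]
      by_cases hb : c = '[' ∨ c = '('
      · rcases hb with h1 | h1 <;> subst h1 <;> simp
      · have hb1 : (c == '[' || c == '(') = false := by
          simp only [Bool.or_eq_false_iff, beq_eq_false_iff_ne]; tauto
        by_cases hcb : c = ']' ∨ c = ')'
        · rcases hcb with h1 | h1 <;> subst h1 <;> simp
        · have hcb1 : (c == ']' || c == ')') = false := by
            simp only [Bool.or_eq_false_iff, beq_eq_false_iff_ne]; tauto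
          by_cases hp : c = '|' ∧ depth = 0
          · obtain ⟨h1, h2⟩ := hp; subst h1; subst h2
            refine ⟨?_, by simp⟩
            simp only [pvAEmit_eq]
            cases hpp : pvSegParse? cur <;> simp [hpp]
          · have hp1 : (c == '|' && depth == 0) = false := by
              rcases Decidable.not_and_iff_or_not.mp hp with h1 | h1 <;>
                simp [beq_eq_false_iff_ne, h1]
            simp [hb1, hcb1, hp1]

lemma pvFold_eq (l : List Char) (st : List (List Char) × List Char × Bool × Option Char × Int)
    (h : pvInv st) :
    l.foldl pvAStep (pvToA st) = pvToA (l.foldl pvBScan st) := by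
  induction l generalizing st with
  | nil => rfl
  | cons c l ih =>
    obtain ⟨h1, h2⟩ := pvStep_eq st c h
    simp only [List.foldl_cons, h1, ih _ h2]

lemma pvMain (s : List Char) :
    pvAEmit (s.foldl pvAStep ([], [], false, none, 0)).1
            (s.foldl pvAStep ([], [], false, none, 0)).2.1 =
      ((s.foldl pvBScan ([], [], false, none, 0)).1 ++
        [(s.foldl pvBScan ([], [], false, none, 0)).2.1]).filterMap pvSegParse? := by
  have h0 : pvInv (([] : List (List Char)), ([] : List Char), false, (none : Option Char), (0 : Int)) := by
    intro h; simp at h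
  have hfold := pvFold_eq s _ h0
  simp only [pvToA, List.filterMap_nil] at hfold
  rw [hfold, pvAEmit_eq, List.filterMap_append]
  cases hpp : pvSegParse? (List.foldl pvBScan ([], [], false, none, 0) s).2.1 <;>
    simp [hpp]

-- ===== glue between B (split-then-repair) and the segment scan =====

-- recursive restatement of B's repair loop, for the induction
def pvMergeTail (st : Bool × Option Char × Int) (segs : List (List Char)) (cur : List Char) :
    List (List Char) → List (List Char)
  | [] => segs ++ [cur]
  | p :: ps =>
    if !st.1 && st.2.2 == 0 then pvMergeTail (pvAdvL st p) (segs ++ [cur]) p ps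
    else pvMergeTail (pvAdvL st p) segs (cur ++ '|' :: p) ps

-- repair of a whole piece list
def pvMergeAll (st : Bool × Option Char × Int) (segs : List (List Char)) (cur : List Char)
    (ps : List (List Char)) : List (List Char) :=
  match ps with
  | [] => segs ++ [cur]
  | h :: t => pvMergeTail (pvAdvL st h) segs (cur ++ h) t

lemma pvSplitPipe_ne_nil (s : List Char) : pvSplitPipe s ≠ [] := by
  cases s with
  | nil => simp [pvSplitPipe]
  | cons c s =>
    simp only [pvSplitPipe]
    split_ifs
    · simp
    · cases pvSplitPipe s <;> simp

lemma pvInv3_adv (st : Bool × Option Char × Int) (c : Char) (h : pvInv3 st) :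
    pvInv3 (pvAdv st c) := by
  obtain ⟨inStr, sc, d⟩ := st
  simp only [pvAdv, pvInv3] at *
  split_ifs <;> simp_all

lemma pvAdvL_cons (st : Bool × Option Char × Int) (c : Char) (l : List Char) :
    pvAdvL st (c :: l) = pvAdvL (pvAdv st c) l := rfl

-- a non-pipe character just advances the state and extends the current segment
lemma pvBScan_adv (segs : List (List Char)) (cur : List Char)
    (st : Bool × Option Char × Int) (c : Char) (hc : c ≠ '|') :
    pvBScan (segs, cur, st) c = (segs, cur ++ [c], pvAdv st c) := by
  obtain ⟨inStr, sc, d⟩ := st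
  simp only [pvBScan, pvAdv]
  by_cases hi : inStr = true
  · subst hi; simp only [if_true]
    cases h : (some c == sc) <;> simp [h]
  · replace hi : inStr = false := by simpa using hi
    subst hi
    simp only [Bool.false_eq_true, if_false]
    have hp : (c == '|' && d == 0) = false := by simp [beq_eq_false_iff_ne, hc]
    split_ifs <;> simp_all

-- an unquoted pipe at depth 0 also leaves the state triple unchanged
lemma pvBScan_pipe (segs : List (List Char)) (cur : List Char)
    (st : Bool × Option Char × Int) (h : pvInv3 st) :
    pvBScan (segs, cur, st) '|' =
      if !st.1 && st.2.2 == 0 then (segs ++ [cur], [], st) else (segs, cur ++ ['|'], st) := by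
  obtain ⟨inStr, sc, d⟩ := st
  simp only [pvBScan, pvInv3] at *
  by_cases hi : inStr = true
  · subst hi
    rcases h rfl with hsc | hsc <;> subst hsc <;> simp
  · replace hi : inStr = false := by simpa using hi
    subst hi
    simp only [Bool.false_eq_true, if_false, Bool.not_false, Bool.true_and]
    by_cases hd : d = 0
    · subst hd; simp
    · have : (d == (0:Int)) = false := by simpa using hd
      simp [this]

-- the repair of the naive split computes exactly the scan's segments
lemma pvScanMerge (s : List Char) :
    ∀ (st : Bool × Option Char × Int) (segs : List (List Char)) (cur : List Char),
      pvInv3 st →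
      pvMergeAll st segs cur (pvSplitPipe s) =
        (s.foldl pvBScan (segs, cur, st)).1 ++ [(s.foldl pvBScan (segs, cur, st)).2.1] := by
  induction s with
  | nil =>
    intro st segs cur _
    simp [pvSplitPipe, pvMergeAll, pvMergeTail]
  | cons c s ih =>
    intro st segs cur hinv
    by_cases hc : c = '|'
    · subst hc
      obtain ⟨h, t, hs⟩ : ∃ h t, pvSplitPipe s = h :: t := by
        cases hsp : pvSplitPipe s with
        | nil => exact absurd hsp (pvSplitPipe_ne_nil s)
        | cons h t => exact ⟨h, t, rfl⟩
      have hL : pvMergeAll st segs cur (pvSplitPipe ('|' :: s)) =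
          pvMergeTail st segs cur (pvSplitPipe s) := by
        simp [pvSplitPipe, pvMergeAll, pvAdvL]
      rw [hL, hs, List.foldl_cons, pvBScan_pipe segs cur st hinv]
      simp only [pvMergeTail]
      by_cases hb : (!st.1 && st.2.2 == 0) = true
      · rw [if_pos hb, if_pos hb]
        have := ih st (segs ++ [cur]) [] hinv
        rw [hs] at this
        simpa [pvMergeAll] using this
      · rw [if_neg hb, if_neg hb]
        have := ih st segs (cur ++ ['|']) hinv
        rw [hs] at this
        simpa [pvMergeAll] using this
    · obtain ⟨h, t, hs⟩ : ∃ h t, pvSplitPipe s = h :: t := by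
        cases hsp : pvSplitPipe s with
        | nil => exact absurd hsp (pvSplitPipe_ne_nil s)
        | cons h t => exact ⟨h, t, rfl⟩
      have hsplit : pvSplitPipe (c :: s) = (c :: h) :: t := by
        simp [pvSplitPipe, hc, hs]
      simp only [hsplit, pvMergeAll, List.foldl_cons, pvBScan_adv segs cur st c hc,
        pvAdvL_cons]
      have := ih (pvAdv st c) segs (cur ++ [c]) (pvInv3_adv st c hinv)
      simp only [pvMergeAll, hs, List.append_assoc, List.cons_append, List.nil_append] at this ⊢
      exact this

-- B's foldl repair loop equals the recursive restatement
lemma pvFoldMergeTail (ps : List (List Char)) :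
    ∀ (st : Bool × Option Char × Int) (segs : List (List Char)) (cur : List Char),
      (ps.foldl pvMergeStep (segs ++ [cur], st)).1 = pvMergeTail st segs cur ps := by
  induction ps with
  | nil => intro st segs cur; simp [pvMergeTail]
  | cons p ps ih =>
    intro st segs cur
    simp only [List.foldl_cons, pvMergeStep, pvMergeTail]
    by_cases hb : (!st.1 && st.2.2 == 0) = true
    · rw [if_pos hb, if_pos hb]
      exact ih (pvAdvL st p) (segs ++ [cur]) p
    · rw [if_neg hb, if_neg hb]
      have hdl : (segs ++ [cur]).dropLast = segs := by simp
      have hgl : (segs ++ [cur]).getLastD [] = cur := by simp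
      rw [hdl, hgl]
      exact ih (pvAdvL st p) segs (cur ++ '|' :: p)

-- ===== VERDICT (by name: the statement is the Claim_ definition above) =====
theorem parse_spl_commands_spec : Claim_equal_parse_spl_commands := by
  intro spl _
  unfold Spec_parse_spl_commands
  simp only [parse_spl_commands, parse_spl_commands_alt]
  set s := if PySem.Chars.startswith (PySem.Chars.strip spl.toList) ['|']
           then PySem.Chars.strip spl.toList
           else "search ".toList ++ PySem.Chars.strip spl.toList with hsdef
  obtain ⟨h, t, hs⟩ : ∃ h t, pvSplitPipe s = h :: t := by
    cases hsp : pvSplitPipe s with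
    | nil => exact absurd hsp (pvSplitPipe_ne_nil s)
    | cons h t => exact ⟨h, t, rfl⟩
  have h0 : pvInv3 ((false : Bool), (none : Option Char), (0 : Int)) := by
    intro hh; simp at hh
  have hB : (pvSplitPipe s).tail.foldl pvMergeStep
        ([(pvSplitPipe s).headD []], pvAdvL (false, none, 0) ((pvSplitPipe s).headD [])) =
      (t.foldl pvMergeStep ([] ++ [h], pvAdvL (false, none, 0) h)) := by
    rw [hs]; rfl
  rw [pvMain s, hB, pvFoldMergeTail t (pvAdvL (false, none, 0) h) [] h]
  have : pvMergeAll (false, none, 0) [] [] (pvSplitPipe s) =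
      pvMergeTail (pvAdvL (false, none, 0) h) [] h t := by
    rw [hs]; simp [pvMergeAll]
  rw [← this, pvScanMerge s (false, none, 0) [] [] h0]
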